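-- pv_equiv track=rewrite | github.com/calmwalter/python_homework | homework3/6.29.py | sumOfDoubleEvenPlace
-- ===== SOURCE A (Python) =====
-- def sumOfDoubleEvenPlace(number):
--     re = 0
--     isEven = False
--     while number > 1:
--         if isEven:
--             re += getDigit(number % 10*2)
--             number //= 10
--             isEven = False
--         else:
--             number //= 10
--             isEven = True
--     return re
--
-- def getDigit(number):
--     if number < 10:
--         return number
--     else:
--         return number % 10+number//10
-- ===== SOURCE B (Python) =====
-- def sumOfDoubleEvenPlace(number):
--     re = 0
--     t = number // 10
--     while t > 1:
--         x = (t % 10) * 2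
--         re += x if x < 10 else x % 10 + x // 10
--         t //= 100
--     return re
-- ===== Notes on version B (the rewrite author's own statement) =====
-- stated objective: simpler
-- what changed: Replaces the two-phase isEven-flag loop with a single loop that visits only the doubled positions, truncating one digit up front and two digits per iteration, with getDigit inlined as a digit-sum expression.
import Mathlib
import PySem

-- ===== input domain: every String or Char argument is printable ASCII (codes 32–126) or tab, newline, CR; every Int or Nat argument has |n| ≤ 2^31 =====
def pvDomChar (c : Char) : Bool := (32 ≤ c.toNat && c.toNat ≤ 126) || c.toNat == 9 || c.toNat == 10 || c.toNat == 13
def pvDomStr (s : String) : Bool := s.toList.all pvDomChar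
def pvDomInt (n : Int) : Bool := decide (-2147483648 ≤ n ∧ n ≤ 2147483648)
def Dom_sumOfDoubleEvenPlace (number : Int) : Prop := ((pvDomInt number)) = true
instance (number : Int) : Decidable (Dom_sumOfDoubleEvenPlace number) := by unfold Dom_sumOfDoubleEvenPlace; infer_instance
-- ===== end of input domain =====

-- B replaces A's two-phase isEven-flag loop by a single loop that visits only the
-- doubled positions (start at number//10, step //=100), with getDigit inlined: simpler, same cost.

-- ===== PORT A =====
def getDigit (number : Int) : Int :=
  if number < 10 then number
  else PySem.Int.mod number 10 + PySem.Int.floordiv number 10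

theorem pv_fdiv10_lt {n : Int} (h : n > 1) : (PySem.Int.floordiv n 10).toNat < n.toNat := by
  have h1 := PySem.Int.floordiv_mul_add_mod n 10
  have h2 := PySem.Int.mod_nonneg n (b := 10) (by omega)
  have h3 := PySem.Int.mod_lt n (b := 10) (by omega)
  omega

def aLoop (number re : Int) (isEven : Bool) : Int :=
  if _h : number > 1 then
    if isEven then
      aLoop (PySem.Int.floordiv number 10) (re + getDigit (PySem.Int.mod number 10 * 2)) false
    else
      aLoop (PySem.Int.floordiv number 10) re true
  else re
termination_by number.toNat
decreasing_by all_goals exact pv_fdiv10_lt _h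

def sumOfDoubleEvenPlace (number : Int) : Int := aLoop number 0 false

-- ===== PORT B =====
def bLoop (t re : Int) : Int :=
  if _h : t > 1 then
    let x := PySem.Int.mod t 10 * 2
    bLoop (PySem.Int.floordiv t 100)
      (re + if x < 10 then x else PySem.Int.mod x 10 + PySem.Int.floordiv x 10)
  else re
termination_by t.toNat
decreasing_by
  have h1 := PySem.Int.floordiv_mul_add_mod t 100
  have h2 := PySem.Int.mod_nonneg t (b := 100) (by omega)
  have h3 := PySem.Int.mod_lt t (b := 100) (by omega)
  omega

def sumOfDoubleEvenPlace_alt (number : Int) : Int := bLoop (PySem.Int.floordiv number 10) 0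

-- ===== PRECONDITION & SPEC =====
def Spec_sumOfDoubleEvenPlace (number : Int) (out : Int) : Prop := out = sumOfDoubleEvenPlace_alt number
instance (number : Int) (out : Int) : Decidable (Spec_sumOfDoubleEvenPlace number out) := by unfold Spec_sumOfDoubleEvenPlace; infer_instance

-- ===== CLAIM (what is proved, stated in full; the proofs are below) =====
def Claim_equal_sumOfDoubleEvenPlace : Prop := ∀ (number : Int), Dom_sumOfDoubleEvenPlace number → Spec_sumOfDoubleEvenPlace number (sumOfDoubleEvenPlace number)

-- ===== LEMMAS AND PROOFS =====

theorem pv_fdiv_fdiv (m : Int) :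
    PySem.Int.floordiv (PySem.Int.floordiv m 10) 10 = PySem.Int.floordiv m 100 := by
  have h1 := PySem.Int.floordiv_mul_add_mod m 10
  have h2 := PySem.Int.mod_nonneg m (b := 10) (by omega)
  have h3 := PySem.Int.mod_lt m (b := 10) (by omega)
  have h4 := PySem.Int.floordiv_mul_add_mod (PySem.Int.floordiv m 10) 10
  have h5 := PySem.Int.mod_nonneg (PySem.Int.floordiv m 10) (b := 10) (by omega)
  have h6 := PySem.Int.mod_lt (PySem.Int.floordiv m 10) (b := 10) (by omega)
  have h7 := PySem.Int.floordiv_mul_add_mod m 100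
  have h8 := PySem.Int.mod_nonneg m (b := 100) (by omega)
  have h9 := PySem.Int.mod_lt m (b := 100) (by omega)
  omega

theorem pv_key (k : Nat) : ∀ (n re : Int), n.toNat ≤ k →
    aLoop n re false = bLoop (PySem.Int.floordiv n 10) re := by
  induction k with
  | zero =>
    intro n re hk
    rw [aLoop, bLoop]
    have h1 := PySem.Int.floordiv_mul_add_mod n 10
    have h2 := PySem.Int.mod_nonneg n (b := 10) (by omega)
    have h3 := PySem.Int.mod_lt n (b := 10) (by omega)
    rw [dif_neg (by omega), dif_neg (by omega)]
  | succ k ih =>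
    intro n re hk
    rw [aLoop]
    by_cases hn : n > 1
    · rw [dif_pos hn, if_neg (by simp)]
      set m := PySem.Int.floordiv n 10 with hm
      rw [aLoop, bLoop]
      by_cases hm1 : m > 1
      · rw [dif_pos hm1, if_pos rfl, dif_pos hm1]
        have hlt : (PySem.Int.floordiv m 10).toNat ≤ k := by
          have := pv_fdiv10_lt hn
          have := pv_fdiv10_lt hm1
          omega
        rw [ih _ _ hlt, pv_fdiv_fdiv]
        simp only [getDigit]
      · rw [dif_neg hm1, dif_neg hm1]
    · rw [dif_neg hn, bLoop]
      have h1 := PySem.Int.floordiv_mul_add_mod n 10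
      have h2 := PySem.Int.mod_nonneg n (b := 10) (by omega)
      have h3 := PySem.Int.mod_lt n (b := 10) (by omega)
      rw [dif_neg (by omega)]

-- ===== VERDICT (by name: the statement is the Claim_ definition above) =====
theorem sumOfDoubleEvenPlace_spec : Claim_equal_sumOfDoubleEvenPlace := by
  intro number _
  unfold Spec_sumOfDoubleEvenPlace sumOfDoubleEvenPlace sumOfDoubleEvenPlace_alt
  exact pv_key number.toNat number 0 (le_refl _)
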